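-- pv_equiv track=rewrite | github.com/emiliano07/TAC-MSA | Codigo/Programacion_Dinamica/programacionDinamica.py | calcularPares
-- ===== SOURCE A (Python) =====
-- def calcularPares(nucleotidos):
--   score = 0
--   gaps = 0
--   nuc = []
--   for indice in range(0,len(nucleotidos)):
--     if (nucleotidos[indice] == "_"):
--       gaps += 1
--     else:
--       nuc.append(nucleotidos[indice])
--   for indicePrincipal in range(0,len(nuc)):
--     aux = calcularGap(nuc[indicePrincipal], gaps)
--     score = score + aux
--     for indiceQueComparo in range(indicePrincipal+1,len(nuc)):
--       aux = calcularNucleotido(nuc[indicePrincipal], nuc[indiceQueComparo])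
--       score = score + aux
--   return score
--
-- def calcularGap(nuleotido, cantidadDeSecuenciasAComparar):
--   valorGap = 1
--   return valorGap * cantidadDeSecuenciasAComparar
--
-- def calcularNucleotido(nuc1, nuc2):
--   match = 3
--   missmatch = -1
--   if (nuc1 == nuc2):
--     if(nuc1 == "_"):
--       return 0
--     return match
--   else:
--     return missmatch
-- ===== SOURCE B (Python) =====
-- def calcularPares(nucleotidos):
--   # Single pass with a frequency dict: each non-gap char scores against the
--   # earlier ones (3 per equal via the dict, -1 per different); the gap term
--   # n*gaps is added once at the end.
--   gaps = 0
--   pares = 0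
--   vistos = {}
--   procesados = 0
--   for c in nucleotidos:
--     if c == "_":
--       gaps += 1
--       continue
--     iguales = vistos.get(c, 0)
--     pares += 3 * iguales - (procesados - iguales)
--     vistos[c] = iguales + 1
--     procesados += 1
--   return pares + procesados * gaps
-- ===== Notes on version B (the rewrite author's own statement) =====
-- stated objective: faster
-- what changed: Replaced A's nested all-pairs index loops by a single pass that keeps a frequency dict of the characters seen so far, scoring each non-gap character against the earlier ones as 3*equal - different and adding the n*gaps term once at the end.
import Mathlib
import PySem

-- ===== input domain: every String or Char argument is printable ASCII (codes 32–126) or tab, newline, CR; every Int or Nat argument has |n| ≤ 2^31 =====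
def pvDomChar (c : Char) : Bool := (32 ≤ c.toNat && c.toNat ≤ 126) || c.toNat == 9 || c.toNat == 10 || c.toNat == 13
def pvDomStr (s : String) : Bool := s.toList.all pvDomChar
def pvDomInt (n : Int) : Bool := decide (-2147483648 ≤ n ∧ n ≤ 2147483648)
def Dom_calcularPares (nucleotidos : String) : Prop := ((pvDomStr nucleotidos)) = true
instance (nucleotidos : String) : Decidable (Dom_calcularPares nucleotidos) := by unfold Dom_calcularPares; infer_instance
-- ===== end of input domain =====

-- B replaces A's quadratic all-pairs scan by a single pass with a frequency dict (objective: faster, asymptotic).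

-- ===== PORT A =====
def calcularGap (_nuleotido : Char) (cantidadDeSecuenciasAComparar : Int) : Int :=
  1 * cantidadDeSecuenciasAComparar

def calcularNucleotido (nuc1 nuc2 : Char) : Int :=
  if nuc1 == nuc2 then
    (if nuc1 == '_' then 0 else 3)
  else -1

def calcularPares (nucleotidos : String) : Int :=
  let cs := nucleotidos.toList
  -- for indice in range(0,len(nucleotidos)): count gaps / append to nuc
  let st := (PySem.List.pyRange 0 (PySem.List.len cs)).foldl
    (fun (st : Int × List Char) indice =>
      let c := PySem.List.pyGetD cs indice ' '   -- in-range index, never the default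
      if c == '_' then (st.1 + 1, st.2) else (st.1, st.2 ++ [c]))
    (0, [])
  let gaps := st.1
  let nuc := st.2
  -- nested index loops accumulating score
  (PySem.List.pyRange 0 (PySem.List.len nuc)).foldl
    (fun score indicePrincipal =>
      let score := score + calcularGap (PySem.List.pyGetD nuc indicePrincipal ' ') gaps
      (PySem.List.pyRange (indicePrincipal + 1) (PySem.List.len nuc)).foldl
        (fun s indiceQueComparo =>
          s + calcularNucleotido (PySem.List.pyGetD nuc indicePrincipal ' ')
                (PySem.List.pyGetD nuc indiceQueComparo ' '))
        score)
    0

-- ===== PORT B =====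
def calcularPares_alt (nucleotidos : String) : Int :=
  -- state: (gaps, pares, vistos, procesados)
  let st := nucleotidos.toList.foldl
    (fun (st : Int × Int × PySem.Dict Char Int × Int) c =>
      if c == '_' then (st.1 + 1, st.2)
      else
        let iguales := st.2.2.1.getD c 0
        (st.1,
         st.2.1 + (3 * iguales - (st.2.2.2 - iguales)),
         st.2.2.1.insert c (iguales + 1),
         st.2.2.2 + 1))
    (0, 0, PySem.Dict.empty, 0)
  st.2.1 + st.2.2.2 * st.1

-- ===== PRECONDITION & SPEC =====
def Spec_calcularPares (nucleotidos : String) (out : Int) : Prop := out = calcularPares_alt nucleotidos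
instance (nucleotidos : String) (out : Int) : Decidable (Spec_calcularPares nucleotidos out) := by unfold Spec_calcularPares; infer_instance

-- ===== CLAIM (what is proved, stated in full; the proofs are below) =====
def Claim_equal_calcularPares : Prop := ∀ (nucleotidos : String), Dom_calcularPares nucleotidos → Spec_calcularPares nucleotidos (calcularPares nucleotidos)

-- ===== LEMMAS AND PROOFS =====

-- pair score of x against the list of earlier characters
def sumF (p : List Char) (x : Char) : Int :=
  (p.map (fun y => calcularNucleotido y x)).sum

-- pair part of the score: process l left to right, p = already-processed prefix
def pairW : List Char → List Char → Int
  | _, [] => 0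
  | p, x :: l => sumF p x + pairW (p ++ [x]) l

lemma pairW_append (l : List Char) : ∀ (p : List Char) (x : Char),
    pairW p (l ++ [x]) = pairW p l + sumF (p ++ l) x := by
  induction l with
  | nil => intro p x; simp [pairW]
  | cons c t ih =>
      intro p x
      simp only [List.cons_append, pairW, ih (p ++ [c]) x, List.append_assoc,
        List.singleton_append, List.nil_append]
      ring

lemma sumF_eq (p : List Char) (c : Char) (hc : c ≠ '_') :
    sumF p c = 3 * (p.count c : Int) - ((p.length : Int) - (p.count c : Int)) := by
  induction p with
  | nil => simp [sumF]
  | cons y t ih =>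
      simp only [sumF, List.map_cons, List.sum_cons] at ih ⊢
      by_cases h : y = c
      · subst h
        rw [calcularNucleotido, if_pos (by simp), if_neg (by simp [hc])]
        rw [List.count_cons_self]; simp only [List.length_cons]; push_cast; omega
      · rw [calcularNucleotido, if_neg (by simp [h])]
        rw [List.count_cons_of_ne (by simp [h])]; simp only [List.length_cons]; push_cast; omega

-- A's first loop computes the gap count and the filtered list
lemma firstLoop (cs : List Char) : ∀ (g0 : Int) (acc : List Char),
    cs.foldl (fun (st : Int × List Char) c =>
        if c == '_' then (st.1 + 1, st.2) else (st.1, st.2 ++ [c])) (g0, acc)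
      = (g0 + (cs.count '_' : Int), acc ++ cs.filter (fun c => c != '_')) := by
  induction cs with
  | nil => intro g0 acc; simp
  | cons c t ih =>
      intro g0 acc
      rw [List.foldl_cons]
      by_cases h : c = '_'
      · subst h
        show List.foldl _ (g0 + 1, acc) t = _
        rw [ih]
        simp [List.count_cons, List.filter_cons]
        omega
      · have hb : (c == '_') = false := by simp [h]
        simp only [hb, Bool.false_eq_true, if_false]
        rw [ih]
        simp [List.count_cons_of_ne (by simp [Ne.symm h] : '_' ≠ c), List.filter_cons, h]

-- the double index loop of A, as a function of the filtered list
def aLoop (l : List Char) (gaps : Int) : Int :=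
  (PySem.List.pyRange 0 (PySem.List.len l)).foldl
    (fun score i =>
      let score := score + calcularGap (PySem.List.pyGetD l i ' ') gaps
      (PySem.List.pyRange (i + 1) (PySem.List.len l)).foldl
        (fun s j => s + calcularNucleotido (PySem.List.pyGetD l i ' ') (PySem.List.pyGetD l j ' '))
        score)
    0

-- sum-of-maps form of aLoop
lemma aLoop_eq_sum (l : List Char) (gaps : Int) :
    aLoop l gaps =
      ((PySem.List.pyRange 0 (PySem.List.len l)).map (fun i =>
        gaps + ((PySem.List.pyRange (i + 1) (PySem.List.len l)).map (fun j =>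
          calcularNucleotido (PySem.List.pyGetD l i ' ') (PySem.List.pyGetD l j ' '))).sum)).sum := by
  unfold aLoop
  rw [PySem.List.foldl_congr_mem _ _
    (fun score i => score + (gaps + ((PySem.List.pyRange (i + 1) (PySem.List.len l)).map (fun j =>
      calcularNucleotido (PySem.List.pyGetD l i ' ') (PySem.List.pyGetD l j ' '))).sum)) _
    ?_]
  · rw [PySem.List.foldl_add]; ring_nf
  · intro acc i _
    simp only [PySem.List.foldl_add, calcularGap]
    ring

lemma aLoop_spec (l : List Char) (gaps : Int) :
    aLoop l gaps = pairW [] l + (l.length : Int) * gaps := by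
  induction l using List.reverseRecOn with
  | nil => simp [aLoop_eq_sum, PySem.List.len_eq, PySem.List.pyRange_one_eq_nil le_rfl, pairW]
  | append_singleton t x ih =>
      rw [aLoop_eq_sum] at ih ⊢
      have hn : PySem.List.len (t ++ [x]) = (t.length : Int) + 1 := by
        rw [PySem.List.len_eq]; simp
      rw [hn, PySem.List.pyRange_one_succ_right (by positivity), List.map_append,
        List.sum_append]
      have hlast : ((([(t.length : Int)]).map (fun i =>
          gaps + ((PySem.List.pyRange (i + 1) ((t.length : Int) + 1)).map (fun j =>
            calcularNucleotido (PySem.List.pyGetD (t ++ [x]) i ' ')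
              (PySem.List.pyGetD (t ++ [x]) j ' '))).sum)).sum) = gaps := by
        simp [PySem.List.pyRange_one_eq_nil (le_refl ((t.length : Int) + 1))]
      rw [hlast]
      have hx : PySem.List.pyGetD (t ++ [x]) (t.length : Int) ' ' = x := by
        rw [PySem.List.pyGetD_eq_getElem _ _ (by positivity) (by simp)]
        simp
      have hcong : (PySem.List.pyRange 0 (t.length : Int)).map (fun i =>
          gaps + ((PySem.List.pyRange (i + 1) ((t.length : Int) + 1)).map (fun j =>
            calcularNucleotido (PySem.List.pyGetD (t ++ [x]) i ' ')
              (PySem.List.pyGetD (t ++ [x]) j ' '))).sum)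
          = (PySem.List.pyRange 0 (t.length : Int)).map (fun i =>
            (gaps + ((PySem.List.pyRange (i + 1) (PySem.List.len t)).map (fun j =>
              calcularNucleotido (PySem.List.pyGetD t i ' ')
                (PySem.List.pyGetD t j ' '))).sum)
            + calcularNucleotido (PySem.List.pyGetD t i ' ') x) := by
        apply List.map_congr_left
        intro i hi
        rcases (PySem.List.mem_pyRange_one).1 hi with ⟨h0, h1⟩
        have hgi : PySem.List.pyGetD (t ++ [x]) i ' ' = PySem.List.pyGetD t i ' ' := by
          rw [PySem.List.pyGetD_eq_getElem _ _ h0 (by simp only [List.length_append, List.length_cons, List.length_nil]; push_cast; omega),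
            PySem.List.pyGetD_eq_getElem _ _ h0 (by omega)]
          rw [List.getElem_append_left (by omega)]
        have hsplit : PySem.List.pyRange (i + 1) ((t.length : Int) + 1)
            = PySem.List.pyRange (i + 1) (t.length : Int) ++ [(t.length : Int)] := by
          exact PySem.List.pyRange_one_succ_right (by omega)
        rw [hgi, hsplit, List.map_append, List.sum_append, PySem.List.len_eq]
        have : (PySem.List.pyRange (i + 1) (t.length : Int)).map (fun j =>
            calcularNucleotido (PySem.List.pyGetD t i ' ') (PySem.List.pyGetD (t ++ [x]) j ' '))
            = (PySem.List.pyRange (i + 1) (t.length : Int)).map (fun j =>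
            calcularNucleotido (PySem.List.pyGetD t i ' ') (PySem.List.pyGetD t j ' ')) := by
          apply List.map_congr_left
          intro j hj
          rcases (PySem.List.mem_pyRange_one).1 hj with ⟨j0, j1⟩
          rw [PySem.List.pyGetD_eq_getElem (t ++ [x]) (i := j) ' ' (by omega)
              (by simp only [List.length_append, List.length_cons, List.length_nil]; push_cast; omega),
            List.getElem_append_left (by omega),
            PySem.List.pyGetD_eq_getElem t (i := j) ' ' (by omega) (by omega)]
        rw [this]
        simp [hx]
        ring
      rw [hcong, PySem.List.sum_map_add_int, pairW_append]
      have hsumF : ((PySem.List.pyRange 0 (t.length : Int)).map (fun i =>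
          calcularNucleotido (PySem.List.pyGetD t i ' ') x)).sum = sumF t x := by
        have : (PySem.List.pyRange 0 (t.length : Int)).map (fun i =>
            calcularNucleotido (PySem.List.pyGetD t i ' ') x)
            = ((PySem.List.pyRange 0 (t.length : Int)).map (fun i => PySem.List.pyGetD t i ' ')).map
              (fun y => calcularNucleotido y x) := by
          rw [List.map_map]; rfl
        rw [this]
        rw [show PySem.List.pyRange 0 (t.length : Int) = PySem.List.pyRange 0 (PySem.List.len t) by
          rw [PySem.List.len_eq]]
        rw [PySem.List.map_pyGetD_pyRange_zero]
        rfl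
      rw [hsumF, ← PySem.List.len_eq, ih]
      simp only [List.nil_append, List.length_append, List.length_cons, List.length_nil]
      push_cast
      ring

-- B's loop invariant
lemma bLoop (l : List Char) : ∀ (p : List Char) (d : PySem.Dict Char Int)
    (hd : ∀ x, d.getD x 0 = (p.count x : Int)) (g0 s0 : Int),
    (l.foldl
      (fun (st : Int × Int × PySem.Dict Char Int × Int) c =>
        if c == '_' then (st.1 + 1, st.2)
        else
          let iguales := st.2.2.1.getD c 0
          (st.1,
           st.2.1 + (3 * iguales - (st.2.2.2 - iguales)),
           st.2.2.1.insert c (iguales + 1),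
           st.2.2.2 + 1))
      (g0, s0, d, (p.length : Int))) =
      (g0 + (l.count '_' : Int),
       s0 + pairW p (l.filter (fun c => c != '_')),
       (l.filter (fun c => c != '_')).foldl (fun d c => d.insert c (d.getD c 0 + 1)) d,
       ((p ++ l.filter (fun c => c != '_')).length : Int)) := by
  induction l with
  | nil => intro p d hd g0 s0; simp [pairW]
  | cons c t ih =>
      intro p d hd g0 s0
      rw [List.foldl_cons]
      by_cases h : c = '_'
      · subst h
        show List.foldl _ (g0 + 1, s0, d, (p.length : Int)) t = _
        rw [ih p d hd]
        simp [List.count_cons, List.filter_cons]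
        omega
      · have hb : (c == '_') = false := by simp [h]
        simp only [hb, Bool.false_eq_true, if_false]
        have harg : d.getD c 0 = (p.count c : Int) := hd c
        rw [harg]
        have hd' : ∀ x, (d.insert c ((p.count c : Int) + 1)).getD x 0 = (((p ++ [c]).count x : Int)) := by
          intro x
          rw [PySem.Dict.getD_insert]
          by_cases hx : x = c
          · subst hx; simp [List.count_append]
          · rw [if_neg hx, hd x]
            simp [List.count_append, Ne.symm hx]
        have hlen : (p.length : Int) + 1 = (((p ++ [c]).length : Int)) := by simp
        rw [hlen, ih (p ++ [c]) _ hd']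
        have hfil : (c :: t).filter (fun c => c != '_') = c :: t.filter (fun c => c != '_') := by
          simp [List.filter_cons, h]
        rw [hfil]
        refine Prod.ext ?_ (Prod.ext ?_ (Prod.ext ?_ ?_))
        · simp [List.count_cons, h]
        · simp [pairW]
          rw [sumF_eq p c h]
          ring
        · simp [hd c]
        · simp


lemma calcA (s : String) :
    calcularPares s
      = aLoop (s.toList.filter (fun c => c != '_')) ((s.toList.count '_' : Int)) := by
  unfold calcularPares
  dsimp only
  have h1 : (PySem.List.pyRange 0 (PySem.List.len s.toList)).foldl
      (fun (st : Int × List Char) indice =>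
        let c := PySem.List.pyGetD s.toList indice ' '
        if c == '_' then (st.1 + 1, st.2) else (st.1, st.2 ++ [c])) (0, [])
      = s.toList.foldl (fun (st : Int × List Char) c =>
        if c == '_' then (st.1 + 1, st.2) else (st.1, st.2 ++ [c])) (0, []) :=
    PySem.List.foldl_pyRange_zero_pyGetD s.toList ' '
      (fun (st : Int × List Char) c =>
        if c == '_' then (st.1 + 1, st.2) else (st.1, st.2 ++ [c])) (0, [])
  rw [h1, firstLoop s.toList 0 []]
  show aLoop ([] ++ s.toList.filter (fun c => c != '_')) (0 + (s.toList.count '_' : Int)) = _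
  rw [List.nil_append, zero_add]

lemma calcB (s : String) :
    calcularPares_alt s
      = pairW [] (s.toList.filter (fun c => c != '_'))
        + ((s.toList.filter (fun c => c != '_')).length : Int) * (s.toList.count '_' : Int) := by
  unfold calcularPares_alt
  have hb := bLoop s.toList [] PySem.Dict.empty (fun x => by simp) 0 0
  simp only [List.length_nil, Nat.cast_zero, List.nil_append] at hb
  rw [hb]
  simp

-- ===== VERDICT (by name: the statement is the Claim_ definition above) =====
theorem calcularPares_spec : Claim_equal_calcularPares := by
  intro s _
  unfold Spec_calcularPares
  rw [calcA, calcB, aLoop_spec]
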